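-- pv_equiv track=rewrite | github.com/Likitha-Gedipudi/adaptive-periodization-agent | src/environment/constraints.py | _count_consecutive_high_intensity
-- ===== SOURCE A (Python) =====
-- from typing import Any, Dict, List
--
-- def _count_consecutive_high_intensity(action_history: List[int]) -> int:
--     """Count consecutive high-intensity days from recent history."""
--     count = 0
--     for action in reversed(action_history):
--         if action >= 3:  # Tempo (3), HIIT (4), Strength (5)
--             count += 1
--         else:
--             break
--     return count
-- ===== SOURCE B (Python) =====
-- from typing import Any, Dict, List
--
-- def _count_consecutive_high_intensity(action_history: List[int]) -> int:
--     """Count consecutive high-intensity days from recent history."""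
--     last_reset = -1
--     for i, action in enumerate(action_history):
--         if action < 3:
--             last_reset = i
--     return len(action_history) - last_reset - 1
-- ===== Notes on version B (the rewrite author's own statement) =====
-- stated objective: alternative
-- what changed: Single forward pass recording the index of the last sub-threshold day (last_reset), returning len - last_reset - 1, instead of counting from the reversed end with an early break.
import Mathlib
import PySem

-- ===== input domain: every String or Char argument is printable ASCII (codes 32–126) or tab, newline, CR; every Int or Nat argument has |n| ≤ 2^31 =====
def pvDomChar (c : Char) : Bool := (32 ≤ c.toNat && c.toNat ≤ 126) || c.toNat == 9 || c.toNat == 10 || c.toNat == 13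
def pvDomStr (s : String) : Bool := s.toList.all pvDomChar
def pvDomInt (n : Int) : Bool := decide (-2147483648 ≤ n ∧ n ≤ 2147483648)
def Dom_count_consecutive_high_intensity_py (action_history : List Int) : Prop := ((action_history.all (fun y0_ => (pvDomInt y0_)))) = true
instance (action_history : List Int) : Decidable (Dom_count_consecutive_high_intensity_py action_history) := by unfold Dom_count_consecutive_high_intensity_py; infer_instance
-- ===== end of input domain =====

-- B replaces A's reversed scan with early break by a single forward pass that records
-- the index of the last sub-threshold day and returns len - last_reset - 1 (alternative decomposition).


-- ===== PORT A =====
-- loop 'for action in reversed(action_history): if action >= 3: count += 1 else: break'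
def cchiGoA : List Int → Int → Int
  | [], count => count
  | a :: rest, count => if a ≥ 3 then cchiGoA rest (count + 1) else count

def count_consecutive_high_intensity_py (action_history : List Int) : Int :=
  cchiGoA action_history.reverse 0

-- ===== PORT B =====
-- 'for i, action in enumerate(action_history): if action < 3: last_reset = i'
def count_consecutive_high_intensity_py_alt (action_history : List Int) : Int :=
  let last_reset := (PySem.List.enumerate action_history).foldl
    (fun lr p => if p.2 < 3 then p.1 else lr) (-1)
  (action_history.length : Int) - last_reset - 1

-- ===== PRECONDITION & SPEC =====
def Spec_count_consecutive_high_intensity_py (action_history : List Int) (out : Int) : Prop := out = count_consecutive_high_intensity_py_alt action_history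
instance (action_history : List Int) (out : Int) : Decidable (Spec_count_consecutive_high_intensity_py action_history out) := by unfold Spec_count_consecutive_high_intensity_py; infer_instance

-- ===== CLAIM (what is proved, stated in full; the proofs are below) =====
def Claim_equal_count_consecutive_high_intensity_py : Prop := ∀ (action_history : List Int), Dom_count_consecutive_high_intensity_py action_history → Spec_count_consecutive_high_intensity_py action_history (count_consecutive_high_intensity_py action_history)

-- ===== LEMMAS AND PROOFS =====

theorem cchiGoA_add (l : List Int) (c : Int) : cchiGoA l c = c + cchiGoA l 0 := by
  induction l generalizing c with
  | nil => simp [cchiGoA]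
  | cons a rest ih =>
    by_cases h : a ≥ 3
    · simp only [cchiGoA, if_pos h]
      rw [ih (c + 1), ih (0 + 1)]; ring
    · simp [cchiGoA, if_neg h]

theorem cchi_main (xs : List Int) :
    cchiGoA xs.reverse 0 =
      (xs.length : Int) -
        (PySem.List.enumerate xs).foldl (fun lr p => if p.2 < 3 then p.1 else lr) (-1) - 1 := by
  induction xs using List.reverseRecOn with
  | nil => simp [cchiGoA, PySem.List.enumerate]
  | append_singleton ys a ih =>
    rw [List.reverse_append]
    simp only [List.reverse_cons, List.reverse_nil, List.nil_append, List.singleton_append]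
    rw [PySem.List.enumerate_append, List.foldl_append]
    by_cases h : a ≥ 3
    · have hn : ¬ a < 3 := by omega
      simp only [cchiGoA, if_pos h, PySem.List.enumerate, List.foldl, if_neg hn]
      rw [cchiGoA_add, ih]
      simp only [List.length_append, List.length_cons, List.length_nil]
      push_cast; ring
    · have hl : a < 3 := by omega
      simp only [cchiGoA, if_neg h, PySem.List.enumerate, List.foldl, if_pos hl]
      simp only [List.length_append, List.length_cons, List.length_nil]
      push_cast; ring

-- ===== VERDICT (by name: the statement is the Claim_ definition above) =====
theorem count_consecutive_high_intensity_py_spec : Claim_equal_count_consecutive_high_intensity_py := by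
  intro xs _
  unfold Spec_count_consecutive_high_intensity_py count_consecutive_high_intensity_py
    count_consecutive_high_intensity_py_alt
  exact cchi_main xs
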